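-- pv_equiv track=rewrite | github.com/AUEB-BALab/RepoFS | src/utils.py | get_full_ref
-- ===== SOURCE A (Python) =====
-- def get_full_ref(path, refs):
--     elements = path.split("/")
--     for ref in refs:
--         ref = ref.split("/")[1:]
--         joined_ref = "/".join(ref)
--         if (path.startswith(joined_ref) and
--                 "/".join(elements[:len(ref)]) == joined_ref):
--             return "/".join(ref)
--     return ""
-- ===== SOURCE B (Python) =====
-- def get_full_ref(path, refs):
--     elements = path.split("/")
--     first_idx = {}
--     for i, ref in enumerate(refs):
--         key = tuple(ref.split("/")[1:])
--         if key not in first_idx: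
--             first_idx[key] = i
--     best = None
--     for k in range(len(elements) + 1):
--         pref = tuple(elements[:k])
--         i = first_idx.get(pref)
--         if i is not None and (best is None or i < best[0]):
--             best = (i, pref)
--     return "/".join(best[1]) if best is not None else ""
-- ===== Notes on version B (the rewrite author's own statement) =====
-- stated objective: alternative
-- what changed: B first builds a dict mapping each ref's stripped segment tuple to its first index in refs, then loops over the path's segment-prefixes (not over refs) and returns the prefix whose first-occurrence index is minimal; A instead scans refs and string-compares a recomputed joined path prefix per ref.
import Mathlib
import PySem

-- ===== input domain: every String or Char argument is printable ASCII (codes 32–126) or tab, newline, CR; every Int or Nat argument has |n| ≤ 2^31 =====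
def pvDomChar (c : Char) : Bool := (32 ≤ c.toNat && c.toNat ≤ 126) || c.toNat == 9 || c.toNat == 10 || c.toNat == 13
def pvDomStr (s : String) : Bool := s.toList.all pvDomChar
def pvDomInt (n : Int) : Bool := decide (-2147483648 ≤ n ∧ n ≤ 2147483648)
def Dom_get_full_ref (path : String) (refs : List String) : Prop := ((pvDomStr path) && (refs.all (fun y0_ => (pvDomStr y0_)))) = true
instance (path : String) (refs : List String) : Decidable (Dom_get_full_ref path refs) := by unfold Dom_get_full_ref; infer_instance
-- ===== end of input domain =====

-- B indexes refs once by their stripped segment tuple (first index wins), then loops over the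
-- path's segment-prefixes and returns the one with the minimal index; A scans refs, recomputing
-- and string-comparing a joined path prefix per ref (objective: alternative).

-- shared helper: Python's s.split("/") (sep is the single char '/', never empty, so split never raises)
def pvSplit (s : String) : List String :=
  (PySem.Chars.splitOn s.toList ['/']).map String.ofList

-- ===== PORT A =====
def pvGoA (path : String) (elements : List String) : List String → String
  | [] => ""
  | ref :: rest =>
    let rsegs := PySem.List.slice (pvSplit ref) (some 1) none
    let joined := PySem.Str.join "/" rsegs
    if PySem.Str.startswith path joined
        && (PySem.Str.join "/" (PySem.List.slice elements none (some (rsegs.length : Int))) == joined)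
    then joined
    else pvGoA path elements rest

def get_full_ref (path : String) (refs : List String) : String :=
  pvGoA path (pvSplit path) refs

-- ===== PORT B =====
-- ref.split("/")[1:] as a list of segments (Python's tuple key, under the List-for-tuple convention)
def pvRseg (ref : String) : List String :=
  PySem.List.slice (pvSplit ref) (some 1) none

-- first loop: for i, ref in enumerate(refs): key = rseg; if key not in first_idx: first_idx[key] = i
def pvBuildIdx : List (Int × String) → PySem.Dict (List String) Int → PySem.Dict (List String) Int
  | [], d => d
  | (i, ref) :: rest, d =>
    let key := pvRseg ref
    pvBuildIdx rest (if d.contains key then d else d.insert key i)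

-- body of the second loop: if i is not None and (best is None or i < best[0]): best = (i, pref)
def pvStep (pref : List String) (i? : Option Int) (best : Option (Int × List String)) :
    Option (Int × List String) :=
  match i?, best with
  | some i, none => some (i, pref)
  | some i, some b => if i < b.1 then some (i, pref) else some b
  | none, best => best

-- second loop: for k in range(len(elements)+1): pref = elements[:k]; i = first_idx.get(pref); …
def pvBestLoop (d : PySem.Dict (List String) Int) (elements : List String) :
    List Int → Option (Int × List String) → Option (Int × List String)
  | [], best => best
  | k :: ks, best =>
    let pref := PySem.List.slice elements none (some k)
    pvBestLoop d elements ks (pvStep pref (PySem.Dict.get? d pref) best)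

def get_full_ref_alt (path : String) (refs : List String) : String :=
  let elements := pvSplit path
  let firstIdx := pvBuildIdx (PySem.List.enumerate refs 0) PySem.Dict.empty
  match pvBestLoop firstIdx elements
      (PySem.List.pyRange 0 ((elements.length : Int) + 1)) none with
  | some b => PySem.Str.join "/" b.2
  | none => ""

-- ===== PRECONDITION & SPEC =====
def Spec_get_full_ref (path : String) (refs : List String) (out : String) : Prop := out = get_full_ref_alt path refs
instance (path : String) (refs : List String) (out : String) : Decidable (Spec_get_full_ref path refs out) := by unfold Spec_get_full_ref; infer_instance

-- ===== CLAIM (what is proved, stated in full; the proofs are below) =====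
def Claim_equal_get_full_ref : Prop := ∀ (path : String) (refs : List String), Dom_get_full_ref path refs → Spec_get_full_ref path refs (get_full_ref path refs)

-- ===== LEMMAS AND PROOFS =====

-- structural reference version of splitting on '/'
def pvSp : List Char → List (List Char)
  | [] => [[]]
  | c :: r =>
    if c = '/' then [] :: pvSp r
    else
      match pvSp r with
      | [] => [[c]]   -- unreachable: pvSp never returns []
      | s :: ss => (c :: s) :: ss

theorem pvSp_ne_nil (cs : List Char) : pvSp cs ≠ [] := by
  cases cs with
  | nil => simp [pvSp]
  | cons c r =>
    simp only [pvSp]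
    split
    · simp
    · cases h : pvSp r <;> simp

theorem pvGo_eq (l : List Char) : ∀ (fuel : Nat) (cur : List Char) (acc : List (List Char)),
    l.length < fuel →
    PySem.Chars.splitOn.go ['/'] fuel l cur acc =
      acc.reverse ++ (match pvSp l with
        | [] => []
        | s :: ss => (cur.reverse ++ s) :: ss) := by
  induction l with
  | nil =>
    intro fuel cur acc _
    cases fuel <;> simp [PySem.Chars.splitOn.go, pvSp]
  | cons c rest ih =>
    intro fuel cur acc h
    cases fuel with
    | zero => omega
    | succ f =>
      rw [PySem.Chars.splitOn.go.eq_def]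
      simp only []
      by_cases hc : c = '/'
      · subst hc
        rw [if_pos (by simp [List.isPrefixOf])]
        simp only [List.length_cons, List.length_nil, List.drop_succ_cons, List.drop_zero]
        rw [ih f [] (cur.reverse :: acc) (by simpa using Nat.lt_of_succ_lt_succ h)]
        cases hsp : pvSp rest with
        | nil => exact absurd hsp (pvSp_ne_nil rest)
        | cons s ss => simp [pvSp, hsp]
      · rw [if_neg (by simp [List.isPrefixOf]; exact fun hx => hc hx.symm)]
        rw [ih f (c :: cur) acc (by simpa using Nat.lt_of_succ_lt_succ h)]
        cases hsp : pvSp rest with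
        | nil => exact absurd hsp (pvSp_ne_nil rest)
        | cons s ss => simp [pvSp, hsp, hc]

theorem pvSplitOn_eq_sp (cs : List Char) : PySem.Chars.splitOn cs ['/'] = pvSp cs := by
  rw [PySem.Chars.splitOn, pvGo_eq cs (cs.length + 1) [] [] (by omega)]
  cases hsp : pvSp cs with
  | nil => exact absurd hsp (pvSp_ne_nil cs)
  | cons s ss => simp

-- join with "/" in terms of flatMap
theorem pvJoin_eq (ss : List (List Char)) : ∀ (s : List Char),
    PySem.Chars.join ['/'] (s :: ss) = s ++ ss.flatMap (fun t => '/' :: t) := by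
  induction ss with
  | nil => intro s; simp [PySem.Chars.join_singleton]
  | cons t ts ih =>
    intro s
    rw [PySem.Chars.join_cons_cons, ih t]
    simp

theorem pvSp_join (cs : List Char) : PySem.Chars.join ['/'] (pvSp cs) = cs := by
  induction cs with
  | nil => simp [pvSp, PySem.Chars.join_singleton]
  | cons c r ih =>
    simp only [pvSp]
    by_cases hc : c = '/'
    · subst hc
      rw [if_pos rfl]
      cases hsp : pvSp r with
      | nil => exact absurd hsp (pvSp_ne_nil r)
      | cons s ss =>
        rw [PySem.Chars.join_cons_cons]
        rw [hsp] at ih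
        simp [ih]
    · rw [if_neg hc]
      cases hsp : pvSp r with
      | nil => exact absurd hsp (pvSp_ne_nil r)
      | cons s ss =>
        rw [pvJoin_eq ss (c :: s)]
        rw [hsp, pvJoin_eq ss s] at ih
        simp [ih]

theorem pvSp_noslash (cs : List Char) : ∀ s ∈ pvSp cs, '/' ∉ s := by
  induction cs with
  | nil => simp [pvSp]
  | cons c r ih =>
    simp only [pvSp]
    by_cases hc : c = '/'
    · subst hc
      rw [if_pos rfl]
      intro s hs
      rcases List.mem_cons.mp hs with rfl | hs
      · simp
      · exact ih s hs
    · rw [if_neg hc]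
      cases hsp : pvSp r with
      | nil => exact absurd hsp (pvSp_ne_nil r)
      | cons s ss =>
        intro u hu
        rcases List.mem_cons.mp hu with rfl | hu
        · intro hmem
          rcases List.mem_cons.mp hmem with h | h
          · exact hc h.symm
          · exact ih s (hsp ▸ List.mem_cons_self) h
        · exact ih u (hsp ▸ List.mem_cons_of_mem _ hu)

theorem pvFirstSlash (a : List Char) : ∀ (b t u : List Char), '/' ∉ a → '/' ∉ b →
    a ++ '/' :: t = b ++ '/' :: u → a = b ∧ t = u := by
  induction a with
  | nil =>
    intro b t u _ hb he
    cases b with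
    | nil => simpa using he
    | cons b0 b' =>
      simp at he
      exact absurd (he.1 ▸ List.mem_cons_self) hb
  | cons a0 a' ih =>
    intro b t u ha hb he
    cases b with
    | nil =>
      simp at he
      exact absurd (he.1 ▸ List.mem_cons_self) ha
    | cons b0 b' =>
      simp at he
      obtain ⟨h0, h1⟩ := he
      obtain ⟨h2, h3⟩ := ih b' t u (fun hx => ha (List.mem_cons_of_mem _ hx))
        (fun hx => hb (List.mem_cons_of_mem _ hx)) h1
      exact ⟨by rw [h0, h2], h3⟩

theorem pvJoin_inj (xs : List (List Char)) : ∀ (ys : List (List Char)),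
    xs.length = ys.length → (∀ s ∈ xs, '/' ∉ s) → (∀ s ∈ ys, '/' ∉ s) →
    PySem.Chars.join ['/'] xs = PySem.Chars.join ['/'] ys → xs = ys := by
  induction xs with
  | nil =>
    intro ys hl _ _ _
    exact (List.length_eq_zero_iff.mp hl.symm).symm ▸ rfl
  | cons x xs' ih =>
    intro ys hl hx hy he
    cases ys with
    | nil => simp at hl
    | cons y ys' =>
      rw [pvJoin_eq xs' x, pvJoin_eq ys' y] at he
      cases hxs : xs' with
      | nil =>
        have : ys' = [] := by simpa [hxs] using hl
        subst this; subst hxs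
        simpa using he
      | cons x2 xs'' =>
        cases hys : ys' with
        | nil => rw [hxs, hys] at hl; simp at hl
        | cons y2 ys'' =>
          subst hxs; subst hys
          simp only [List.flatMap_cons, List.cons_append] at he
          obtain ⟨h1, h2⟩ := pvFirstSlash x y _ _
            (hx x List.mem_cons_self) (hy y List.mem_cons_self) he
          have h3 : PySem.Chars.join ['/'] (x2 :: xs'') = PySem.Chars.join ['/'] (y2 :: ys'') := by
            rw [pvJoin_eq xs'' x2, pvJoin_eq ys'' y2]
            simpa using h2
          have h4 := ih (y2 :: ys'') (by simpa using hl)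
            (fun s hs => hx s (List.mem_cons_of_mem _ hs))
            (fun s hs => hy s (List.mem_cons_of_mem _ hs)) h3
          rw [h1, h4]

theorem pvJoin_count (s : List Char) (ss : List (List Char))
    (h : ∀ t ∈ s :: ss, '/' ∉ t) :
    (PySem.Chars.join ['/'] (s :: ss)).count '/' = ss.length := by
  induction ss generalizing s with
  | nil =>
    rw [PySem.Chars.join_singleton]
    simpa using List.count_eq_zero.mpr (h s List.mem_cons_self)
  | cons t ts ih =>
    rw [PySem.Chars.join_cons_cons]
    have h1 := ih t (fun u hu => h u (List.mem_cons_of_mem _ hu))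
    have h0 : s.count '/' = 0 := List.count_eq_zero.mpr (h s List.mem_cons_self)
    simp [List.count_append, h0, h1]

theorem pvJoin_prefix {xs ys : List (List Char)} (h : xs <+: ys) :
    PySem.Chars.join ['/'] xs <+: PySem.Chars.join ['/'] ys := by
  obtain ⟨t, rfl⟩ := h
  cases xs with
  | nil => simp [PySem.Chars.join_nil]
  | cons x xs' =>
    rw [List.cons_append, pvJoin_eq xs' x, pvJoin_eq (xs' ++ t) x]
    rw [List.flatMap_append, ← List.append_assoc]
    exact List.prefix_append _ _

theorem pvRound (l : List (List Char)) : (l.map String.ofList).map String.toList = l := by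
  rw [List.map_map]
  conv_rhs => rw [← List.map_id l]
  exact List.map_congr_left (fun x _ => String.toList_ofList)

-- A's per-ref condition holds iff the stripped ref is a segment-prefix of the split path
theorem pvCondA_iff (path ref : String) :
    (PySem.Str.startswith path (PySem.Str.join "/" (PySem.List.slice (pvSplit ref) (some 1) none))
      && (PySem.Str.join "/" (PySem.List.slice (pvSplit path) none
            (some ((PySem.List.slice (pvSplit ref) (some 1) none).length : Int)))
          == PySem.Str.join "/" (PySem.List.slice (pvSplit ref) (some 1) none))) = true
    ↔ PySem.List.slice (pvSplit ref) (some 1) none <+: pvSplit path := by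
  have hE : pvSplit path = (pvSp path.toList).map String.ofList := by
    rw [pvSplit, pvSplitOn_eq_sp]
  have hR : PySem.List.slice (pvSplit ref) (some 1) none
      = ((pvSp ref.toList).tail).map String.ofList := by
    rw [PySem.List.slice_from_one, pvSplit, pvSplitOn_eq_sp, List.map_tail]
  set E : List (List Char) := pvSp path.toList with hEdef
  set R : List (List Char) := (pvSp ref.toList).tail with hRdef
  have hEno : ∀ s ∈ E, '/' ∉ s := pvSp_noslash path.toList
  have hRno : ∀ s ∈ R, '/' ∉ s := fun s hs => pvSp_noslash ref.toList s (List.mem_of_mem_tail hs)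
  have hP : path.toList = PySem.Chars.join ['/'] E := (pvSp_join path.toList).symm
  have hslice : PySem.List.slice (pvSplit path) none
      (some ((PySem.List.slice (pvSplit ref) (some 1) none).length : Int))
      = (E.take R.length).map String.ofList := by
    rw [hR, hE, List.length_map, PySem.List.slice_to_natCast, List.map_take]
  rw [hslice, hR, hE, Bool.and_eq_true, beq_iff_eq, PySem.Str.startswith_eq]
  rw [PySem.Chars.startswith_iff]
  have hJ : ∀ l : List (List Char),
      (PySem.Str.join "/" (l.map String.ofList)).toList = PySem.Chars.join ['/'] l := by
    intro l
    rw [PySem.Str.toList_join, pvRound l]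
    rfl
  have hjoin_eq : (PySem.Str.join "/" ((E.take R.length).map String.ofList)
        = PySem.Str.join "/" (R.map String.ofList))
      ↔ PySem.Chars.join ['/'] (E.take R.length) = PySem.Chars.join ['/'] R := by
    constructor
    · intro h
      rw [← hJ, ← hJ, h]
    · intro h
      apply String.toList_inj.mp
      rw [hJ, hJ, h]
  have hpre : R.map String.ofList <+: E.map String.ofList ↔ R <+: E := by
    constructor
    · intro h
      have := h.map String.toList
      rwa [pvRound, pvRound] at this
    · exact fun h => h.map String.ofList
  rw [hpre, hjoin_eq, hJ, hP]
  constructor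
  · rintro ⟨_, h2⟩
    by_cases hk : R.length ≤ E.length
    · have hlen : (E.take R.length).length = R.length := by simp [hk]
      have heq := pvJoin_inj (E.take R.length) R hlen
        (fun s hs => hEno s (List.mem_of_mem_take hs)) hRno h2
      rw [← heq]
      exact List.take_prefix _ _
    · exfalso
      rw [List.take_of_length_le (by omega)] at h2
      cases hEc : E with
      | nil => exact pvSp_ne_nil path.toList (hEdef ▸ hEc)
      | cons e es =>
        cases hRc : R with
        | nil => rw [hRc] at hk; simp at hk
        | cons r rs =>
          rw [hEc] at hEno
          rw [hRc] at hRno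
          rw [hEc, hRc] at h2
          have c1 := pvJoin_count e es hEno
          have c2 := pvJoin_count r rs hRno
          rw [h2, c2] at c1
          rw [hEc, hRc] at hk
          simp only [List.length_cons] at hk
          omega
  · intro h
    have htake : E.take R.length = R := (List.prefix_iff_eq_take.mp h).symm
    exact ⟨pvJoin_prefix h, by rw [htake]⟩

-- reference: first stripped ref that is a segment-prefix of E
def pvFirst (E : List String) : List String → Option (List String)
  | [] => none
  | ref :: rest => if pvRseg ref <+: E then some (pvRseg ref) else pvFirst E rest

theorem pvA_eq_first (path : String) (refs : List String) :
    get_full_ref path refs =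
      match pvFirst (pvSplit path) refs with
      | some r => PySem.Str.join "/" r
      | none => "" := by
  unfold get_full_ref
  induction refs with
  | nil => rfl
  | cons ref rest ih =>
    simp only [pvGoA, pvFirst]
    have hcond := pvCondA_iff path ref
    by_cases hp : pvRseg ref <+: pvSplit path
    · rw [if_pos (hcond.mpr hp), if_pos hp]
      rfl
    · rw [if_neg (fun hc => hp (hcond.mp hc)), if_neg hp]
      exact ih

-- pvFirst characterizations
theorem pvFirst_none {E : List String} {refs : List String} (h : pvFirst E refs = none) :
    ∀ ref ∈ refs, ¬ pvRseg ref <+: E := by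
  induction refs with
  | nil => simp
  | cons ref rest ih =>
    simp only [pvFirst] at h
    split at h
    · exact absurd h (by simp)
    · intro r hr
      rcases List.mem_cons.mp hr with rfl | hr
      · assumption
      · exact ih h r hr

theorem pvFirst_some {E : List String} {refs : List String} {r : List String}
    (h : pvFirst E refs = some r) :
    ∃ j : Nat, ∃ hj : j < refs.length, pvRseg refs[j] = r ∧ r <+: E ∧
      ∀ j' < j, ¬ pvRseg refs[j']! <+: E := by
  induction refs with
  | nil => simp [pvFirst] at h
  | cons ref rest ih =>
    simp only [pvFirst] at h
    split at h
    · refine ⟨0, by simp, by simpa using (Option.some_inj.mp h), ?_, by omega⟩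
      rw [← Option.some_inj.mp h]; assumption
    · obtain ⟨j, hj, h1, h2, h3⟩ := ih h
      refine ⟨j + 1, by simpa using hj, by simpa using h1, h2, ?_⟩
      intro j' hj'
      cases j' with
      | zero => simpa using (by assumption : ¬ pvRseg ref <+: E)
      | succ m =>
        have := h3 m (by omega)
        simpa using this

-- the built dict looks up the FIRST occurrence index of a key in refs (by stripped segments)
theorem pvBuildIdx_get? (l : List (Int × String)) :
    ∀ (d : PySem.Dict (List String) Int) (k : List String),
    (pvBuildIdx l d).get? k =
      ((d.get? k).or ((l.find? (fun p => pvRseg p.2 == k)).map (·.1))) := by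
  induction l with
  | nil => intro d k; simp [pvBuildIdx]
  | cons p rest ih =>
    intro d k
    obtain ⟨i, ref⟩ := p
    by_cases hk : pvRseg ref = k
    · subst hk
      rw [List.find?_cons_of_pos (by simp)]
      by_cases hc : d.contains (pvRseg ref)
      · simp only [pvBuildIdx, if_pos hc]
        rw [ih]
        obtain ⟨v, hv⟩ : ∃ v, d.get? (pvRseg ref) = some v := by
          have hcc := PySem.Dict.contains_eq_isSome_get? d (pvRseg ref)
          rw [hc] at hcc
          exact Option.isSome_iff_exists.mp hcc.symm
        simp [hv]
      · simp only [pvBuildIdx, if_neg hc]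
        rw [ih, PySem.Dict.get?_insert, if_pos rfl,
          (PySem.Dict.get?_eq_none_iff_contains d _).mpr (by simpa using hc)]
        simp
    · rw [List.find?_cons_of_neg (by simpa using hk)]
      by_cases hc : d.contains (pvRseg ref)
      · simp only [pvBuildIdx, if_pos hc]
        rw [ih]
      · simp only [pvBuildIdx, if_neg hc]
        rw [ih, PySem.Dict.get?_insert, if_neg (fun h => hk h.symm)]

-- find? over enumerate = findIdx? over the list
theorem pvEnum_find? (refs : List String) (k : List String) : ∀ (s : Int),
    ((PySem.List.enumerate refs s).find? (fun p => pvRseg p.2 == k)).map (·.1)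
      = (refs.findIdx? (fun r => pvRseg r == k)).map (fun m => s + (m : Int)) := by
  induction refs with
  | nil => intro s; simp [PySem.List.enumerate_nil]
  | cons ref rest ih =>
    intro s
    rw [PySem.List.enumerate_cons, List.find?_cons, List.findIdx?_cons]
    by_cases h : pvRseg ref = k
    · simp [h]
    · rw [if_neg (by simpa using h)]
      simp only [show (pvRseg ref == k) = false by simpa using h, ih (s + 1)]
      cases rest.findIdx? (fun r => pvRseg r == k) <;> simp
      ring

-- the dict B builds, characterized
theorem pvIdx_get? (refs : List String) (k : List String) :
    (pvBuildIdx (PySem.List.enumerate refs 0) PySem.Dict.empty).get? k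
      = (refs.findIdx? (fun r => pvRseg r == k)).map (fun m => (m : Int)) := by
  rw [pvBuildIdx_get?, PySem.Dict.get?_empty, Option.none_or, pvEnum_find? refs k 0]
  cases refs.findIdx? (fun r => pvRseg r == k) <;> simp

-- any value the dict returns is a stripped ref occurring in refs
theorem pvIdx_val {refs : List String} {k : List String} {i : Int}
    (h : (pvBuildIdx (PySem.List.enumerate refs 0) PySem.Dict.empty).get? k = some i) :
    ∃ m : Nat, i = (m : Int) ∧ ∃ hm : m < refs.length, pvRseg refs[m] = k := by
  rw [pvIdx_get?] at h
  cases hfi : refs.findIdx? (fun r => pvRseg r == k) with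
  | none => rw [hfi] at h; simp at h
  | some m =>
    rw [hfi] at h
    simp at h
    obtain ⟨hlt, hp, -⟩ := List.findIdx?_eq_some_iff_getElem.mp hfi
    exact ⟨m, by omega, hlt, by simpa using hp⟩

theorem pvStep_none (pref : List String) (best : Option (Int × List String)) :
    pvStep pref none best = best := rfl

theorem pvStep_some_none (pref : List String) (i : Int) :
    pvStep pref (some i) none = some (i, pref) := rfl

theorem pvStep_some_some (pref : List String) (i : Int) (b : Int × List String) :
    pvStep pref (some i) (some b) = if i < b.1 then some (i, pref) else some b := rfl

-- loop lemma: once best = (j, r) with j minimal among prefix hits, it never changes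
theorem pvLoop_keep {d : PySem.Dict (List String) Int} {E : List String} {j : Int} {r : List String}
    (hmin : ∀ (p : List String) (i : Int), d.get? p = some i → p <+: E → j ≤ i) :
    ∀ ks : List Int, (∀ k ∈ ks, 0 ≤ k) →
      pvBestLoop d E ks (some (j, r)) = some (j, r) := by
  intro ks
  induction ks with
  | nil => intro _; rfl
  | cons k ks ih =>
    intro hnn
    have hk0 : (0:Int) ≤ k := hnn k List.mem_cons_self
    have hpre : PySem.List.slice E none (some k) <+: E := by
      rw [PySem.List.slice_to E hk0]; exact List.take_prefix _ _
    simp only [pvBestLoop]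
    cases hg : PySem.Dict.get? d (PySem.List.slice E none (some k)) with
    | none =>
      rw [pvStep_none]
      exact ih (fun x hx => hnn x (List.mem_cons_of_mem _ hx))
    | some i =>
      have hji := hmin _ i hg hpre
      rw [pvStep_some_some, if_neg (by simp only [not_lt]; omega)]
      exact ih (fun x hx => hnn x (List.mem_cons_of_mem _ hx))

-- loop lemma: if r (with minimal index j) occurs among the prefixes scanned, the loop finds (j, r)
theorem pvLoop_find {d : PySem.Dict (List String) Int} {E : List String} {j : Int} {r : List String}
    (hmin : ∀ (p : List String) (i : Int), d.get? p = some i → p <+: E →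
        j ≤ i ∧ (i = j → p = r))
    (hr : d.get? r = some j) :
    ∀ (ks : List Int) (best : Option (Int × List String)),
      (∀ k ∈ ks, 0 ≤ k) →
      (∃ k ∈ ks, PySem.List.slice E none (some k) = r) →
      (best = none ∨ ∃ bi bp, best = some (bi, bp) ∧ d.get? bp = some bi ∧ bp <+: E) →
      pvBestLoop d E ks best = some (j, r) := by
  intro ks
  induction ks with
  | nil => rintro best _ ⟨k, hk, _⟩ _; simp at hk
  | cons k ks ih =>
    rintro best hnn hex hinv
    have hk0 : (0:Int) ≤ k := hnn k List.mem_cons_self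
    have hnn' : ∀ x ∈ ks, (0:Int) ≤ x := fun x hx => hnn x (List.mem_cons_of_mem _ hx)
    have hpre : PySem.List.slice E none (some k) <+: E := by
      rw [PySem.List.slice_to E hk0]; exact List.take_prefix _ _
    simp only [pvBestLoop]
    by_cases hhit : PySem.List.slice E none (some k) = r
    · rw [hhit, hr]
      rcases hinv with rfl | ⟨bi, bp, rfl, hbp, hbpre⟩
      · rw [pvStep_some_none]
        exact pvLoop_keep (fun p i hg hp => (hmin p i hg hp).1) ks hnn'
      · obtain ⟨hjbi, hbieq⟩ := hmin bp bi hbp hbpre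
        rw [pvStep_some_some]
        by_cases hlt : j < bi
        · rw [if_pos hlt]
          exact pvLoop_keep (fun p i hg hp => (hmin p i hg hp).1) ks hnn'
        · have hbij : bi = j := by omega
          have hbpr : bp = r := hbieq hbij
          subst hbpr; subst hbij
          rw [if_neg (by omega)]
          exact pvLoop_keep (fun p i hg hp => (hmin p i hg hp).1) ks hnn'
    · have hex' : ∃ k' ∈ ks, PySem.List.slice E none (some k') = r := by
        obtain ⟨k', hk', heq⟩ := hex
        rcases List.mem_cons.mp hk' with rfl | hk'
        · exact absurd heq hhit
        · exact ⟨k', hk', heq⟩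
      cases hg : PySem.Dict.get? d (PySem.List.slice E none (some k)) with
      | none =>
        rw [pvStep_none]
        exact ih _ hnn' hex' hinv
      | some i =>
        rcases hinv with rfl | ⟨bi, bp, rfl, hbp, hbpre⟩
        · rw [pvStep_some_none]
          exact ih _ hnn' hex' (Or.inr ⟨i, _, rfl, hg, hpre⟩)
        · rw [pvStep_some_some]
          by_cases hlt : i < bi
          · rw [if_pos hlt]
            exact ih _ hnn' hex' (Or.inr ⟨i, _, rfl, hg, hpre⟩)
          · rw [if_neg hlt]
            exact ih _ hnn' hex' (Or.inr ⟨bi, bp, rfl, hbp, hbpre⟩)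

-- loop lemma: if no scanned prefix is in the dict, the loop returns none
theorem pvLoop_none {d : PySem.Dict (List String) Int} {E : List String}
    (hno : ∀ (p : List String) (i : Int), d.get? p = some i → ¬ p <+: E) :
    ∀ ks : List Int, (∀ k ∈ ks, 0 ≤ k) → pvBestLoop d E ks none = none := by
  intro ks
  induction ks with
  | nil => intro _; rfl
  | cons k ks ih =>
    intro hnn
    have hk0 : (0:Int) ≤ k := hnn k List.mem_cons_self
    have hpre : PySem.List.slice E none (some k) <+: E := by
      rw [PySem.List.slice_to E hk0]; exact List.take_prefix _ _
    simp only [pvBestLoop]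
    cases hg : PySem.Dict.get? d (PySem.List.slice E none (some k)) with
    | none =>
      rw [pvStep_none]
      exact ih (fun x hx => hnn x (List.mem_cons_of_mem _ hx))
    | some i => exact absurd hpre (hno _ i hg)

theorem pvB_eq_first (path : String) (refs : List String) :
    get_full_ref_alt path refs =
      match pvFirst (pvSplit path) refs with
      | some r => PySem.Str.join "/" r
      | none => "" := by
  simp only [get_full_ref_alt]
  have hnn : ∀ k ∈ PySem.List.pyRange 0 (((pvSplit path).length : Int) + 1), (0:Int) ≤ k :=
    fun k hk => (PySem.List.mem_pyRange_one.mp hk).1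
  cases hf : pvFirst (pvSplit path) refs with
  | none =>
    have hno : ∀ (p : List String) (i : Int),
        (pvBuildIdx (PySem.List.enumerate refs 0) PySem.Dict.empty).get? p = some i →
        ¬ p <+: pvSplit path := by
      intro p i hg hp
      obtain ⟨m, _, hm, hval⟩ := pvIdx_val hg
      exact pvFirst_none hf refs[m] (by simp) (hval ▸ hp)
    rw [pvLoop_none hno _ hnn]
  | some r =>
    obtain ⟨j, hj, hval, hpre, hminpre⟩ := pvFirst_some hf
    have hr : (pvBuildIdx (PySem.List.enumerate refs 0) PySem.Dict.empty).get? r = some (j : Int) := by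
      rw [pvIdx_get?]
      have hfi : refs.findIdx? (fun x => pvRseg x == r) = some j := by
        rw [List.findIdx?_eq_some_iff_getElem]
        refine ⟨hj, by simpa using hval, ?_⟩
        intro j' hj'
        simp only [beq_iff_eq]
        intro hcontra
        exact hminpre j' hj' (by
          rw [getElem!_pos refs j' (by omega), hcontra]; exact hpre)
      rw [hfi]; rfl
    have hmin : ∀ (p : List String) (i : Int),
        (pvBuildIdx (PySem.List.enumerate refs 0) PySem.Dict.empty).get? p = some i →
        p <+: pvSplit path → (j : Int) ≤ i ∧ (i = (j : Int) → p = r) := by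
      intro p i hg hp
      obtain ⟨m, rfl, hm, hvalm⟩ := pvIdx_val hg
      have hjm : j ≤ m := by
        by_contra hlt
        exact hminpre m (by omega) (by
          rw [getElem!_pos refs m hm, hvalm]; exact hp)
      refine ⟨by exact_mod_cast hjm, ?_⟩
      intro heq
      have hmj : m = j := by exact_mod_cast heq
      subst hmj
      rw [← hvalm, hval]
    have hex : ∃ k ∈ PySem.List.pyRange 0 (((pvSplit path).length : Int) + 1),
        PySem.List.slice (pvSplit path) none (some k) = r := by
      refine ⟨(r.length : Int), PySem.List.mem_pyRange_one.mpr
        ⟨by positivity, by have := hpre.length_le; omega⟩, ?_⟩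
      rw [PySem.List.slice_to_natCast]
      exact (List.prefix_iff_eq_take.mp hpre).symm
    rw [pvLoop_find hmin hr _ none hnn hex (Or.inl rfl)]

-- ===== VERDICT (by name: the statement is the Claim_ definition above) =====
theorem get_full_ref_spec : Claim_equal_get_full_ref := by
  intro path refs _
  unfold Spec_get_full_ref
  rw [pvA_eq_first, pvB_eq_first]
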